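-- pv_equiv track=rewrite | github.com/openproblems-bio/task-dge-perturbation-prediction | src/task/methods/lstm_gru_cnn_ensemble/closest_sqrt_factor.py | find_balanced_divisors
-- ===== SOURCE A (Python) =====
-- import math
--
-- def closest_sqrt_factor(x):
--     """
--     Finds the factor of x that is closest to the square root of x.
--
--     Args:
--         x: The number to find the closest factor of.
--
--     Returns:
--         The closest factor to the square root of x, or -1 if x is less than 1.
--     """
--
--     # Base cases
--     if x < 1:
--         return -1
--     if x == 1:
--         return 1
--
--     # Start from the square root of x (rounded down)
--     start = math.isqrt(x)
--
--     # Check if the start value is a factor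
--     if x % start == 0:
--         return start
--
--     # Look for factors above and below the start
--     for factor in range(start, 0, -1):
--         if x % factor == 0:
--             other_factor = x // factor
--             return min(factor, other_factor, key=lambda f: abs(f - math.sqrt(x)))
--
-- def find_balanced_divisors(n, threshold=50):
--     current_n = n
--     while True:
--         divisor1 = closest_sqrt_factor(current_n)
--         divisor2 = current_n//divisor1
--         if divisor2 != (current_n/divisor1):
--             raise ValueError(f"divisor2 is not an integer: {divisor2}")
--         if abs(divisor1 - divisor2) < threshold:
--             return current_n, [divisor1, divisor2]
--         current_n += 1
-- ===== SOURCE B (Python) =====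
-- import math
--
--
-- def closest_sqrt_factor(x):
--     """Largest factor of x that is <= sqrt(x), or -1 if x < 1."""
--     if x < 1:
--         return -1
--     best = 1
--     for d in range(1, math.isqrt(x) + 1):
--         if x % d == 0:
--             best = d
--     return best
--
--
-- def find_balanced_divisors(n, threshold=50):
--     m = n
--     while True:
--         d = closest_sqrt_factor(m)
--         q = m // d
--         if abs(d - q) < threshold:
--             return m, [d, q]
--         m += 1
-- ===== Notes on version B (the rewrite author's own statement) =====
-- stated objective: simpler
-- what changed: closest_sqrt_factor becomes one ascending accumulator scan over 1..isqrt(x) keeping the largest divisor seen (the downward early-exit trial division, the separate isqrt start-check and the float-sqrt min-by-distance selection are all gone, since the lower factor is provably always the result), and the dead ValueError guard is dropped from the outer loop.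
import Mathlib
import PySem

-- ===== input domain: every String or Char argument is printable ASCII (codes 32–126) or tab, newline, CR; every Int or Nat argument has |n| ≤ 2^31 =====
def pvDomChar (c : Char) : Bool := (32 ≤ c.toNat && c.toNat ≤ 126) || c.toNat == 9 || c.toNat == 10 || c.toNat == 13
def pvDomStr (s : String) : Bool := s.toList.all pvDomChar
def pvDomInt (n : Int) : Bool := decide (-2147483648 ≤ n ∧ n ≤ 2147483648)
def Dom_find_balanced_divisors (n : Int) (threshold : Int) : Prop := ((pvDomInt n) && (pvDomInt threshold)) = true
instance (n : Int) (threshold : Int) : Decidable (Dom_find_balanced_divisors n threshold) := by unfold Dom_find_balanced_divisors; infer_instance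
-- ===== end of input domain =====

-- B replaces A's downward early-exit trial division plus float-sqrt min-by-distance selection with a
-- single ascending accumulator scan keeping the largest divisor ≤ isqrt(x) (objective: simpler).

-- Shared primitive: exact port of math.isqrt (Newton's method, exact for 0 ≤ x; both Pythons call math.isqrt)
def pvIsqrtGo (x : Int) : Nat → Int → Int
  | 0, x0 => x0
  | f+1, x0 =>
    let x1 := PySem.Int.floordiv (x0 + PySem.Int.floordiv x x0) 2
    if x0 ≤ x1 then x0 else pvIsqrtGo x f x1

def pvIsqrt (x : Int) : Int :=
  if x < 2 then x else pvIsqrtGo x 64 x   -- 64 iterations are ample for |x| ≤ 2^31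

-- ===== PORT A =====
-- 'for factor in range(start, 0, -1)': descending scan, counter k is the current factor
def csfLoopA (x : Int) : Nat → Int
  | 0 => 0          -- for-loop fell through (Python would return None); unreachable: factor 1 always divides
  | d+1 =>
    let factor : Int := (d : Int) + 1
    if PySem.Int.mod x factor = 0 then
      let other_factor := PySem.Int.floordiv x factor
      -- min(factor, other_factor, key=lambda f: abs(f - math.sqrt(x))) ported exactly as the integer
      -- comparison 4*x ≤ (factor+other_factor)^2 (ties pick the first argument, as Python's min does);
      -- for |x| ≤ 2^31 the float-sqrt rounding error cannot flip this comparison, so this is exact on Dom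
      if 4 * x ≤ (factor + other_factor) ^ 2 then factor else other_factor
    else csfLoopA x d

def closest_sqrt_factor (x : Int) : Int :=
  if x < 1 then -1
  else if x = 1 then 1
  else
    let start := pvIsqrt x
    if PySem.Int.mod x start = 0 then start
    else csfLoopA x start.toNat

def fbdLoopA (threshold : Int) : Nat → Int → Int × List Int
  | 0, _ => (0, [])   -- fuel guard only, to make the 'while True' loop total; never reached when Python's loop returns
  | f+1, current_n =>
    let divisor1 := closest_sqrt_factor current_n
    let divisor2 := PySem.Int.floordiv current_n divisor1
    -- 'divisor2 != current_n/divisor1' is exactly 'divisor1 does not divide current_n' (the float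
    -- quotient is exact below 2^53); Python raises ValueError there, but the branch is unreachable
    -- because divisor1 always divides current_n
    if divisor2 * divisor1 ≠ current_n then (0, [])
    else if |divisor1 - divisor2| < threshold then (current_n, [divisor1, divisor2])
    else fbdLoopA threshold f (current_n + 1)

def find_balanced_divisors (n : Int) (threshold : Int) : Int × List Int :=
  fbdLoopA threshold 8589934592 n

-- ===== PORT B =====
def csfStep (x best d : Int) : Int := if PySem.Int.mod x d = 0 then d else best

def closest_sqrt_factor_alt (x : Int) : Int :=
  if x < 1 then -1
  else (PySem.List.pyRange 1 (pvIsqrt x + 1) 1).foldl (csfStep x) 1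

def fbdLoopB (threshold : Int) : Nat → Int → Int × List Int
  | 0, _ => (0, [])   -- same fuel guard as the A-side port
  | f+1, m =>
    let d := closest_sqrt_factor_alt m
    let q := PySem.Int.floordiv m d
    if |d - q| < threshold then (m, [d, q]) else fbdLoopB threshold f (m + 1)

def find_balanced_divisors_alt (n : Int) (threshold : Int) : Int × List Int :=
  fbdLoopB threshold 8589934592 n

-- ===== PRECONDITION & SPEC =====
def Spec_find_balanced_divisors (n : Int) (threshold : Int) (out : Int × List Int) : Prop := out = find_balanced_divisors_alt n threshold
instance (n : Int) (threshold : Int) (out : Int × List Int) : Decidable (Spec_find_balanced_divisors n threshold out) := by unfold Spec_find_balanced_divisors; infer_instance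

-- ===== CLAIM (what is proved, stated in full; the proofs are below) =====
def Claim_equal_find_balanced_divisors : Prop := ∀ (n : Int) (threshold : Int), Dom_find_balanced_divisors n threshold → Spec_find_balanced_divisors n threshold (find_balanced_divisors n threshold)

-- ===== LEMMAS AND PROOFS =====

lemma pv_floordiv_mul (m d : Int) (h : d ∣ m) : PySem.Int.floordiv m d * d = m := by
  have h1 := PySem.Int.floordiv_mul_add_mod m d
  have h2 := (PySem.Int.mod_eq_zero_iff_dvd m d).mpr h
  linarith

lemma pv_min_is_lower (x f : Int) (hd : f ∣ x) : 4 * x ≤ (f + PySem.Int.floordiv x f) ^ 2 := by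
  have h := pv_floordiv_mul x f hd
  nlinarith [sq_nonneg (f - PySem.Int.floordiv x f)]

lemma pv_go_pos (x : Int) (hx : 2 ≤ x) : ∀ (f : Nat) (x0 : Int), 1 ≤ x0 → 1 ≤ pvIsqrtGo x f x0 := by
  intro f
  induction f with
  | zero => intro x0 h; simpa [pvIsqrtGo] using h
  | succ f ih =>
    intro x0 h
    simp only [pvIsqrtGo]
    split
    · exact h
    · apply ih
      have h2 : 2 ≤ x0 + PySem.Int.floordiv x x0 := by
        rcases eq_or_lt_of_le h with h1 | h1
        · have : PySem.Int.floordiv x 1 = x := by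
            have := PySem.Int.floordiv_mul_add_mod x 1
            have := (PySem.Int.mod_eq_zero_iff_dvd x 1).mpr (one_dvd x)
            linarith
          rw [← h1, this]; omega
        · have h0 : 0 ≤ PySem.Int.floordiv x x0 :=
            (PySem.Int.le_floordiv_iff_mul_le (by omega)).mpr (by nlinarith)
          omega
      exact (PySem.Int.le_floordiv_iff_mul_le (by omega)).mpr (by omega)

lemma pv_isqrt_pos (x : Int) (hx : 2 ≤ x) : 1 ≤ pvIsqrt x := by
  rw [pvIsqrt, if_neg (by omega : ¬ x < 2)]
  exact pv_go_pos x hx 64 x (by omega)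

-- the descending first-hit scan of A equals B's ascending last-hit fold
lemma pv_desc_eq_asc (x : Int) : ∀ (k : Nat), 1 ≤ k →
    csfLoopA x k = (PySem.List.pyRange 1 ((k : Int) + 1) 1).foldl (csfStep x) 1 := by
  intro k
  induction k with
  | zero => omega
  | succ d ih =>
    intro _
    have hb : (1 : Int) ≤ (d : Int) + 1 := by omega
    have hrange : PySem.List.pyRange 1 (((d+1 : Nat) : Int) + 1) 1
        = PySem.List.pyRange 1 ((d : Int) + 1) 1 ++ [(d : Int) + 1] := by
      push_cast
      exact PySem.List.pyRange_one_succ_right hb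
    rw [hrange, List.foldl_append]
    simp only [List.foldl_cons, List.foldl_nil]
    by_cases hm : PySem.Int.mod x ((d : Int) + 1) = 0
    · have hdvd : ((d : Int) + 1) ∣ x := (PySem.Int.mod_eq_zero_iff_dvd x _).mp hm
      simp only [csfLoopA, csfStep, hm, if_pos]
      rw [if_pos (pv_min_is_lower x _ hdvd)]
    · rcases Nat.eq_zero_or_pos d with hd | hd
      · subst hd
        simp only [Nat.cast_zero, zero_add] at hm
        exact absurd ((PySem.Int.mod_eq_zero_iff_dvd x 1).mpr (one_dvd x)) hm
      · simp only [csfLoopA, csfStep, hm, if_false]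
        exact ih hd

lemma pv_fold_inv (x : Int) (l : List Int) (hl : ∀ a ∈ l, 1 ≤ a) :
    ∀ (b : Int), b ∣ x → 1 ≤ b → (l.foldl (csfStep x) b) ∣ x ∧ 1 ≤ l.foldl (csfStep x) b := by
  induction l with
  | nil => intro b hb hb1; exact ⟨hb, hb1⟩
  | cons a t ih =>
    intro b hb hb1
    simp only [List.foldl_cons]
    by_cases h : PySem.Int.mod x a = 0
    · simp only [csfStep, h, if_pos]
      exact ih (fun y hy => hl y (List.mem_cons_of_mem a hy))
        a ((PySem.Int.mod_eq_zero_iff_dvd x a).mp h) (hl a List.mem_cons_self)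
    · simp only [csfStep, h, if_false]
      exact ih (fun y hy => hl y (List.mem_cons_of_mem a hy)) b hb hb1

lemma pv_closest_eq (x : Int) : closest_sqrt_factor x = closest_sqrt_factor_alt x := by
  by_cases h1 : x < 1
  · simp [closest_sqrt_factor, closest_sqrt_factor_alt, h1]
  · by_cases h2 : x = 1
    · subst h2; decide
    · have hx : 2 ≤ x := by omega
      have hs1 : 1 ≤ pvIsqrt x := pv_isqrt_pos x hx
      simp only [closest_sqrt_factor, closest_sqrt_factor_alt, if_neg h1, if_neg h2]
      have hdesc := pv_desc_eq_asc x (pvIsqrt x).toNat (by omega)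
      rw [Int.toNat_of_nonneg (by omega)] at hdesc
      by_cases hm : PySem.Int.mod x (pvIsqrt x) = 0
      · rw [if_pos hm, PySem.List.pyRange_one_succ_right hs1, List.foldl_append]
        simp [csfStep, hm]
      · rw [if_neg hm, hdesc]

lemma pv_alt_spec (m : Int) : closest_sqrt_factor_alt m ∣ m ∧ closest_sqrt_factor_alt m ≠ 0 := by
  by_cases h : m < 1
  · refine ⟨?_, by simp [closest_sqrt_factor_alt, h]⟩
    simp only [closest_sqrt_factor_alt, if_pos h]
    exact (IsUnit.neg isUnit_one).dvd
  · simp only [closest_sqrt_factor_alt, if_neg h]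
    have := pv_fold_inv m (PySem.List.pyRange 1 (pvIsqrt m + 1) 1)
      (fun a ha => (PySem.List.mem_pyRange_one.mp ha).1) 1 (one_dvd m) le_rfl
    exact ⟨this.1, by omega⟩

lemma pv_loops_eq (t : Int) : ∀ (f : Nat) (m : Int), fbdLoopA t f m = fbdLoopB t f m := by
  intro f
  induction f with
  | zero => intro m; rfl
  | succ f ih =>
    intro m
    simp only [fbdLoopA, fbdLoopB, pv_closest_eq]
    obtain ⟨hdvd, hne⟩ := pv_alt_spec m
    have hmul := pv_floordiv_mul m _ hdvd
    rw [if_neg (not_ne_iff.mpr hmul)]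
    split
    · rfl
    · exact ih (m + 1)

-- ===== VERDICT (by name: the statement is the Claim_ definition above) =====
theorem find_balanced_divisors_spec : Claim_equal_find_balanced_divisors := by
  intro n t _dom
  simp only [Spec_find_balanced_divisors, find_balanced_divisors, find_balanced_divisors_alt]
  exact pv_loops_eq t _ n
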